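-- pv_equiv track=rewrite | github.com/icegressoifes/Escavador_Web_Scraping | escavador_scraper/generate_combination_name.py | f_mapea_stopwords_words
-- ===== SOURCE A (Python) =====
-- def f_mapea_stopwords_words(nome):
-- 	uniao = ""
-- 	dic = {}
-- 	for palavra in nome.split():
-- 		if uniao != "":
-- 			dic[palavra] = uniao + " " + palavra
-- 			uniao = ""
-- 		if palavra.lower() in ["da", "de", "do", "dos","das"]:
-- 			uniao = palavra
-- 	return dic
-- ===== SOURCE B (Python) =====
-- def f_mapea_stopwords_words(nome):
--     words = nome.split()
--     dic = {}
--     for prev, cur in zip(words, words[1:]):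
--         if prev.lower() in ("da", "de", "do", "dos", "das"):
--             dic[cur] = prev + " " + cur
--     return dic
-- ===== Notes on version B (the rewrite author's own statement) =====
-- stated objective: simpler
-- what changed: Replaces A's carried pending-stopword accumulator state machine with a stateless pairwise pass over zip(words, words[1:]), inserting the current word when the previous one is a stopword.
import Mathlib
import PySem

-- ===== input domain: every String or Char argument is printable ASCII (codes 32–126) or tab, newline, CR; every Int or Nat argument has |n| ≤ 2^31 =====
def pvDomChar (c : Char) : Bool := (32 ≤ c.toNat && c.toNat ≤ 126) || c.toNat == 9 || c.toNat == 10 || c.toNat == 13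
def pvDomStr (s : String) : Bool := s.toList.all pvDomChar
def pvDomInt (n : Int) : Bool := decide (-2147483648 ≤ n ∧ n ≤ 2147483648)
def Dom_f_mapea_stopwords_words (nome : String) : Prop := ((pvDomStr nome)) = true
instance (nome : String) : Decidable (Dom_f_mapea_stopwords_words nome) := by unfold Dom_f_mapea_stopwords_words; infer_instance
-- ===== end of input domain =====

-- B replaces A's carried pending-stopword state flag with a stateless pass over adjacent word pairs (simpler decomposition, same cost).

-- ===== PORT A =====
-- one loop iteration of A: consume a pending stopword, then maybe set a new one
def pvStepA (st : String × PySem.Dict String String) (palavra : String) :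
    String × PySem.Dict String String :=
  let uniao := st.1
  let dic := st.2
  let st1 : String × PySem.Dict String String :=
    if uniao ≠ "" then ("", dic.insert palavra (uniao ++ " " ++ palavra)) else (uniao, dic)
  if PySem.Str.lower palavra ∈ (["da", "de", "do", "dos", "das"] : List String) then
    (palavra, st1.2)
  else st1

def f_mapea_stopwords_words (nome : String) : List (String × String) :=
  ((PySem.Str.split₀ nome).foldl pvStepA ("", PySem.Dict.empty)).2.items

-- ===== PORT B =====
-- one iteration of B over an adjacent pair (prev, cur)
def pvStepB (dic : PySem.Dict String String) (p : String × String) :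
    PySem.Dict String String :=
  if PySem.Str.lower p.1 ∈ (["da", "de", "do", "dos", "das"] : List String) then
    dic.insert p.2 (p.1 ++ " " ++ p.2)
  else dic

def f_mapea_stopwords_words_alt (nome : String) : List (String × String) :=
  let words := PySem.Str.split₀ nome
  ((words.zip words.tail).foldl pvStepB PySem.Dict.empty).items

-- ===== PRECONDITION & SPEC =====
def Spec_f_mapea_stopwords_words (nome : String) (out : List (String × String)) : Prop := out = f_mapea_stopwords_words_alt nome
instance (nome : String) (out : List (String × String)) : Decidable (Spec_f_mapea_stopwords_words nome out) := by unfold Spec_f_mapea_stopwords_words; infer_instance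

-- ===== CLAIM (what is proved, stated in full; the proofs are below) =====
def Claim_equal_f_mapea_stopwords_words : Prop := ∀ (nome : String), Dom_f_mapea_stopwords_words nome → Spec_f_mapea_stopwords_words nome (f_mapea_stopwords_words nome)

-- ===== LEMMAS AND PROOFS =====

-- a word whose lowering is one of the stopwords is nonempty
theorem pv_stop_ne_empty (w : String)
    (h : PySem.Str.lower w ∈ (["da", "de", "do", "dos", "das"] : List String)) : w ≠ "" := by
  intro hw; subst hw
  simp [PySem.Str.lower] at h
  revert h; decide

-- main invariant: resuming A's loop after processing word w equals B's fold over the remaining pairs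
theorem pv_loop_eq (ws : List String) : ∀ (w : String) (dic : PySem.Dict String String),
    (ws.foldl pvStepA
      ((if PySem.Str.lower w ∈ (["da", "de", "do", "dos", "das"] : List String) then w else ""), dic)).2
    = ((w :: ws).zip ws).foldl pvStepB dic := by
  induction ws with
  | nil => intro w dic; simp
  | cons v rest ih =>
    intro w dic
    by_cases hw : PySem.Str.lower w ∈ (["da", "de", "do", "dos", "das"] : List String)
    · have hne := pv_stop_ne_empty w hw
      simp only [if_pos hw, List.foldl_cons, List.zip_cons_cons]
      rw [show pvStepA (w, dic) v
          = ((if PySem.Str.lower v ∈ (["da", "de", "do", "dos", "das"] : List String) then v else ""),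
             dic.insert v (w ++ " " ++ v)) from by
        simp [pvStepA, hne]; split_ifs <;> simp]
      rw [ih]
      simp [pvStepB, hw]
    · simp only [if_neg hw, List.foldl_cons, List.zip_cons_cons]
      rw [show pvStepA ("", dic) v
          = ((if PySem.Str.lower v ∈ (["da", "de", "do", "dos", "das"] : List String) then v else ""), dic) from by
        simp [pvStepA]; split_ifs <;> simp]
      rw [ih]
      simp [pvStepB, hw]

-- ===== VERDICT (by name: the statement is the Claim_ definition above) =====
theorem f_mapea_stopwords_words_spec : Claim_equal_f_mapea_stopwords_words := by
  intro nome _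
  unfold Spec_f_mapea_stopwords_words f_mapea_stopwords_words f_mapea_stopwords_words_alt
  cases hws : PySem.Str.split₀ nome with
  | nil => simp
  | cons w rest =>
    simp only [List.foldl_cons, List.tail_cons]
    rw [show pvStepA ("", PySem.Dict.empty) w
        = ((if PySem.Str.lower w ∈ (["da", "de", "do", "dos", "das"] : List String) then w else ""),
           PySem.Dict.empty) from by
      simp [pvStepA]; split_ifs <;> simp]
    rw [pv_loop_eq]
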